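-- pv_equiv track=rewrite | github.com/ChanChar/whiteboard | strings_and_arrows.py | count_arrows
-- ===== SOURCE A (Python) =====
-- def count_arrows(case):
--     patterns = { ">>-->", "<--<<" }
--     chars = list(case)
--     count = 0
--
--     for i, char in enumerate(chars):
--         if i + 4 > len(chars) - 1:
--             return count
--         else:
--             if "".join(chars[i:i+5]) in patterns:
--                 count += 1
--
--     return count
-- ===== SOURCE B (Python) =====
-- def count_arrows(case):
--     total = 0
--     for pat in (">>-->", "<--<<"):
--         i = case.find(pat)
--         while i >= 0:
--             total += 1
--             i = case.find(pat, i + 1)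
--     return total
-- ===== Notes on version B (the rewrite author's own statement) =====
-- stated objective: faster
-- what changed: Replaces A's per-position scan - which builds list(case), slices and joins a 5-char window at every index and tests it against a set - with two str.find jump loops (one per pattern) that hop from match to match with a moving start offset, counting occurrences directly.
import Mathlib
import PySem

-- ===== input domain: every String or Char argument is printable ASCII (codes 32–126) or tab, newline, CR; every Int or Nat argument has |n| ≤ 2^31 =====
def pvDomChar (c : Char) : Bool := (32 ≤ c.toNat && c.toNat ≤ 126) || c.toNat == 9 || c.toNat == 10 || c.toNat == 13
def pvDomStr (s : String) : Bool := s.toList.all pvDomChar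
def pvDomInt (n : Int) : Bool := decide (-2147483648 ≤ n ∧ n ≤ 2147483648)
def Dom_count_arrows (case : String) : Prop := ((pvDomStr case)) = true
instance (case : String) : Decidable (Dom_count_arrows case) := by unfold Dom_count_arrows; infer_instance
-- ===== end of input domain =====

-- B replaces A's per-position window scan (list/slice/join at every index) with two find-jump
-- loops (str.find with a moving start), one per pattern; measurably faster by constant factor.

-- ===== PORT A =====
-- the loop 'for i, char in enumerate(chars): …' with its early return;
-- the joined window ''.join(chars[i:i+5]) is represented as the List Char slice itself
def count_arrows_go (chars : List Char) (patterns : PySem.Set (List Char)) :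
    List (Int × Char) → Int → Int
  | [], count => count
  | (i, _) :: rest, count =>
    if i + 4 > (chars.length : Int) - 1 then count
    else
      if patterns.contains (PySem.List.slice chars (some i) (some (i + 5))) then
        count_arrows_go chars patterns rest (count + 1)
      else
        count_arrows_go chars patterns rest count

def count_arrows (case : String) : Int :=
  let patterns : PySem.Set (List Char) := PySem.Set.ofList [">>-->".toList, "<--<<".toList]
  let chars := case.toList
  count_arrows_go chars patterns (PySem.List.enumerate chars 0) 0

-- ===== PORT B =====
-- 'i = case.find(pat); while i >= 0: total += 1; i = case.find(pat, i + 1)';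
-- fuel s.length + 1 is a totality guard only: indices strictly increase, so it never runs out
def count_arrows_whileFind (s pat : List Char) : Nat → Int → Int → Int
  | 0, _, total => total
  | fuel + 1, i, total =>
    if i ≥ 0 then
      count_arrows_whileFind s pat fuel (PySem.Chars.findFrom s pat (i + 1) none) (total + 1)
    else total

def count_arrows_alt (case : String) : Int :=
  [">>-->", "<--<<"].foldl
    (fun total pat =>
      count_arrows_whileFind case.toList pat.toList (case.toList.length + 1)
        (PySem.Chars.find case.toList pat.toList) total)
    0

-- ===== PRECONDITION & SPEC =====
def Spec_count_arrows (case : String) (out : Int) : Prop := out = count_arrows_alt case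
instance (case : String) (out : Int) : Decidable (Spec_count_arrows case out) := by unfold Spec_count_arrows; infer_instance

-- ===== CLAIM (what is proved, stated in full; the proofs are below) =====
def Claim_equal_count_arrows : Prop := ∀ (case : String), Dom_count_arrows case → Spec_count_arrows case (count_arrows case)

-- ===== LEMMAS AND PROOFS =====

-- number of positions j ≥ k at which pat is a prefix of s.drop j (the common spec)
def pvMC (s pat : List Char) (k : Nat) : Nat :=
  if _h : k < s.length then (if pat <+: s.drop k then 1 else 0) + pvMC s pat (k + 1) else 0
termination_by s.length - k

lemma pvMC_eq_zero (s pat : List Char) (k : Nat)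
    (h : ∀ j, k ≤ j → ¬ pat <+: s.drop j) : pvMC s pat k = 0 := by
  rw [pvMC]
  split
  · rw [if_neg (h k le_rfl), pvMC_eq_zero s pat (k + 1) (fun j hj => h j (by omega))]
  · rfl
termination_by s.length - k

lemma pvMC_eq_of_no_match (s pat : List Char) (k m : Nat) (hkm : k ≤ m) (hm : m ≤ s.length)
    (h : ∀ j, k ≤ j → j < m → ¬ pat <+: s.drop j) : pvMC s pat k = pvMC s pat m := by
  rcases Nat.eq_or_lt_of_le hkm with rfl | hlt
  · rfl
  · rw [pvMC, dif_pos (by omega), if_neg (h k le_rfl hlt), Nat.zero_add]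
    exact pvMC_eq_of_no_match s pat (k + 1) m hlt hm (fun j hj => h j (by omega))
termination_by m - k

lemma pvMC_step (s pat : List Char) (k : Nat) (hk : k < s.length) (hp : pat <+: s.drop k) :
    pvMC s pat k = 1 + pvMC s pat (k + 1) := by
  rw [pvMC, dif_pos hk, if_pos hp]

def pvP1 : List Char := ">>-->".toList
def pvP2 : List Char := "<--<<".toList

lemma pv_no_short_prefix (s pat : List Char) (k : Nat) (hp : pat.length = 5)
    (hshort : s.length < k + 5) : pvMC s pat k = 0 :=
  pvMC_eq_zero s pat k (fun j hj hpre => by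
    have hle := hpre.length_le
    rw [hp, List.length_drop] at hle
    omega)

lemma pvMC_notmatch (s pat : List Char) (k : Nat) (hlt : k < s.length)
    (h : ¬ pat <+: s.drop k) : pvMC s pat k = pvMC s pat (k + 1) := by
  rw [pvMC, dif_pos hlt, if_neg h, Nat.zero_add]

lemma pvMC_stop (s pat : List Char) (k : Nat) (hge : s.length ≤ k) : pvMC s pat k = 0 := by
  rw [pvMC, dif_neg (by omega)]

lemma pvA_go (s : List Char) (k : Nat) (count : Int) :
    count_arrows_go s (PySem.Set.ofList [pvP1, pvP2]) (PySem.List.enumerate (s.drop k) k) count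
      = count + pvMC s pvP1 k + pvMC s pvP2 k := by
  rcases Nat.lt_or_ge k s.length with hlt | hge
  · rw [List.drop_eq_getElem_cons hlt, PySem.List.enumerate_cons, count_arrows_go]
    have hstart : (k : Int) + 1 = ((k + 1 : Nat) : Int) := by omega
    by_cases hshort : s.length < k + 5
    · rw [if_pos (by omega),
        pv_no_short_prefix s pvP1 k (by decide) hshort,
        pv_no_short_prefix s pvP2 k (by decide) hshort]
      simp
    · rw [if_neg (by omega)]
      have hb : (k : Int) + 5 = ((k + 5 : Nat) : Int) := by omega
      rw [hb, PySem.List.slice_natCast, Nat.add_sub_cancel_left]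
      have he1 : pvP1 <+: s.drop k ↔ List.take 5 (s.drop k) = pvP1 := by
        rw [List.prefix_iff_eq_take, eq_comm]; rfl
      have he2 : pvP2 <+: s.drop k ↔ List.take 5 (s.drop k) = pvP2 := by
        rw [List.prefix_iff_eq_take, eq_comm]; rfl
      have hcont : PySem.Set.contains (PySem.Set.ofList [pvP1, pvP2]) (List.take 5 (s.drop k))
          = (decide (List.take 5 (s.drop k) = pvP1) || decide (List.take 5 (s.drop k) = pvP2)) := by
        have hset : (PySem.Set.ofList [pvP1, pvP2] : List (List Char)) = [pvP1, pvP2] := by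
          decide
        rw [PySem.Set.contains, hset]
        by_cases h1 : List.take 5 (s.drop k) = pvP1 <;>
          by_cases h2 : List.take 5 (s.drop k) = pvP2 <;>
            simp [h1, h2]
      rw [hcont]
      by_cases h1 : List.take 5 (s.drop k) = pvP1
      · have h2 : ¬ pvP2 <+: s.drop k := fun hc =>
          absurd (h1.symm.trans (he2.mp hc)) (by decide)
        rw [if_pos (by simp [h1]), hstart, pvA_go s (k + 1) (count + 1),
          pvMC_step s pvP1 k hlt (he1.mpr h1), pvMC_notmatch s pvP2 k hlt h2]
        push_cast; ring
      · by_cases h2 : List.take 5 (s.drop k) = pvP2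
        · rw [if_pos (by simp [h2]), hstart, pvA_go s (k + 1) (count + 1),
            pvMC_step s pvP2 k hlt (he2.mpr h2),
            pvMC_notmatch s pvP1 k hlt (fun hc => h1 (he1.mp hc))]
          push_cast; ring
        · rw [if_neg (by simp [h1, h2]), hstart, pvA_go s (k + 1) count,
            pvMC_notmatch s pvP1 k hlt (fun hc => h1 (he1.mp hc)),
            pvMC_notmatch s pvP2 k hlt (fun hc => h2 (he2.mp hc))]
  · rw [List.drop_eq_nil_of_le hge, PySem.List.enumerate_nil, count_arrows_go,
      pvMC_stop s pvP1 k hge, pvMC_stop s pvP2 k hge]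
    simp
termination_by s.length - k

lemma pv_prefix_drop_infix (s pat : List Char) (k j : Nat) (hkj : k ≤ j)
    (h : pat <+: s.drop j) : pat <:+: s.drop k := by
  have hd : s.drop j = (s.drop k).drop (j - k) := by rw [List.drop_drop]; congr 1; omega
  rw [hd] at h
  exact h.isInfix.trans (List.drop_suffix _ _).isInfix

lemma pvB_while (s pat : List Char) (hpat : pat ≠ []) (fuel k : Nat) (hk : k ≤ s.length)
    (hfuel : s.length + 1 - k ≤ fuel) (total : Int) :
    count_arrows_whileFind s pat fuel (PySem.Chars.findFrom s pat (k : Int) none) total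
      = total + pvMC s pat k := by
  induction fuel generalizing k total with
  | zero => omega
  | succ fuel ih =>
    by_cases hne : PySem.Chars.findFrom s pat (k : Int) none = -1
    · rw [hne]
      have hno : ¬ pat <:+: s.drop k :=
        (PySem.Chars.findFrom_natCast_eq_neg_one_iff s pat k hk).mp hne
      rw [pvMC_eq_zero s pat k (fun j hj hp => hno (pv_prefix_drop_infix s pat k j hj hp))]
      simp [count_arrows_whileFind]
    · obtain ⟨hki, hpre, hmin⟩ := PySem.Chars.findFrom_natCast_spec s pat k hk hne
      set i := PySem.Chars.findFrom s pat (k : Int) none with hidef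
      have hnn : (0 : Int) ≤ i := le_trans (by exact_mod_cast Int.natCast_nonneg k) hki
      have hik : i = ((i.toNat : Nat) : Int) := (Int.toNat_of_nonneg hnn).symm
      have hkm : k ≤ i.toNat := by omega
      have hmlt : i.toNat < s.length := by
        by_contra hge
        have : s.drop i.toNat = [] := List.drop_eq_nil_of_le (by omega)
        rw [this] at hpre
        exact hpat (List.prefix_nil.mp hpre)
      rw [count_arrows_whileFind, if_pos hnn]
      have harg : i + 1 = ((i.toNat + 1 : Nat) : Int) := by omega
      rw [harg, ih (i.toNat + 1) (by omega) (by omega) (total + 1)]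
      rw [pvMC_eq_of_no_match s pat k i.toNat hkm (le_of_lt hmlt) hmin,
        pvMC_step s pat i.toNat hmlt hpre]
      push_cast
      ring

-- ===== VERDICT (by name: the statement is the Claim_ definition above) =====
theorem count_arrows_spec : Claim_equal_count_arrows := by
  intro case _
  unfold Spec_count_arrows count_arrows count_arrows_alt
  have hA := pvA_go case.toList 0 0
  simp only [List.drop_zero, Int.natCast_zero] at hA
  have hB1 := pvB_while case.toList pvP1 (by decide) (case.toList.length + 1) 0
    (Nat.zero_le _) (by omega) 0
  have hB2 := pvB_while case.toList pvP2 (by decide) (case.toList.length + 1) 0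
    (Nat.zero_le _) (by omega) (0 + (pvMC case.toList pvP1 0 : Int))
  simp only [Int.natCast_zero, PySem.Chars.findFrom_zero] at hB1 hB2
  simp only [List.foldl, pvP1, pvP2] at hA hB1 hB2 ⊢
  rw [hA, hB1, hB2]
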